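-- pv_equiv track=rewrite | github.com/JonasProg/ProjectEuler | Problem_306.py | paper_strip_game
-- ===== SOURCE A (Python) =====
-- def paper_strip_game(Kettenlänge):
--     Person_2_win_counter = 0
--     Person_1_win_counter = 0
--     for y in range (1, Kettenlänge +1):
--         Kettenlänge = y
--         Person_1 = True # Person 1 fängt immer an!
--         Person_2 = True
--         while Person_1 == True and Person_2 == True:
--             if Kettenlänge >= 2:
--                 Kettenlängencounter = Kettenlänge
--                 high = True
--                 for x in range (0, Kettenlängencounter +1):
--                     if Kettenlänge % (4*x+2) == 0:
--                         high = False
--                 for z in range (0, Kettenlängencounter +1):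
--                     if Kettenlänge % (4*z +3) ==0:
--                         high = False
--                 if high == False:
--                     Kettenlänge = Kettenlänge - 2
--                 else:
--                     Kettenlänge = Kettenlänge - 4
--                 high = True
--             else:
--                 Person_1 = False
--             if Kettenlänge >= 2:
--                 Kettenlängencounter = Kettenlänge
--                 high2 = True
--                 for x in range(1, Kettenlängencounter + 1):
--                     if Kettenlänge % (4 * x) == 0:
--                         high2 = False
--                 for z in range(0, Kettenlängencounter + 1):
--                     if Kettenlänge % (4 * z + 1) == 0:
--                         high2 = False
--                 if high2 == False:
--                     Kettenlänge = Kettenlänge - 2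
--                 else:
--                     Kettenlänge = Kettenlänge - 4
--                 high2 = True
--             else:
--                 if Person_1 == True:
--                     Person_2 = False
--         if Person_1 == False:
--             Person_2_win_counter = Person_2_win_counter +1
--         if Person_2 == False:
--             Person_1_win_counter = Person_1_win_counter +1
--     return Person_1_win_counter, Person_2_win_counter
-- ===== SOURCE B (Python) =====
-- def paper_strip_game(Kettenlänge):
--     # Memoized bottom-up game table: one O(k) divisor scan per length, instead of
--     # replaying every game from scratch with four O(k) scans per round.
--     n = Kettenlänge
--     memo = [False, False]  # memo[k] = True iff the first player wins a strip of length k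
--     for k in range(2, n + 1):
--         if any(k % d == 0 and d % 4 in (2, 3) for d in range(2, k + 1)):
--             k1 = k - 2
--         else:
--             k1 = k - 4
--         memo.append(True if k1 < 2 else memo[k1 - 2])
--     wins1 = 0
--     wins2 = 0
--     for k in range(1, n + 1):
--         if memo[k]:
--             wins1 += 1
--         else:
--             wins2 += 1
--     return wins1, wins2
-- ===== Notes on version B (the rewrite author's own statement) =====
-- stated objective: faster
-- what changed: Instead of replaying every game of each start length with four O(k) divisibility scans per round, B tabulates the game outcome for each length bottom-up with one O(k) divisor scan per length and reads wins off the memo table.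
import Mathlib
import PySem

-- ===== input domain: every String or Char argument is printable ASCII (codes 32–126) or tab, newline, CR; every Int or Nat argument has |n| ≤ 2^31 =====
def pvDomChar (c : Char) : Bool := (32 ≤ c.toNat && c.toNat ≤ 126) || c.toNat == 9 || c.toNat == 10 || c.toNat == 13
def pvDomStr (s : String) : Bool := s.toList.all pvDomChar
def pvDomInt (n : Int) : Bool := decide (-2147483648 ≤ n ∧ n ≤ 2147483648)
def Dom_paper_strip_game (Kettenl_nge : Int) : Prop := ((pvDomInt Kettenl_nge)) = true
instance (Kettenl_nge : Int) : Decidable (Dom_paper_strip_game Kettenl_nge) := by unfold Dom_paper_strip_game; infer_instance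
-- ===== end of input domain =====

-- B replaces A's per-game replay (four O(k) scans per round, every start length replayed
-- from scratch) with a bottom-up memo table and one divisor scan per length (objective: faster).


-- ===== PORT A =====
-- the two scans that set `high` in person 1's move
def highA (K : Int) : Bool :=
  let h := (PySem.List.pyRange 0 (K+1) 1).foldl
    (fun h x => if PySem.Int.mod K (4*x+2) == 0 then false else h) true
  (PySem.List.pyRange 0 (K+1) 1).foldl
    (fun h z => if PySem.Int.mod K (4*z+3) == 0 then false else h) h

-- the two scans that set `high2` in person 2's move
def high2A (K : Int) : Bool :=
  let h := (PySem.List.pyRange 1 (K+1) 1).foldl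
    (fun h x => if PySem.Int.mod K (4*x) == 0 then false else h) true
  (PySem.List.pyRange 0 (K+1) 1).foldl
    (fun h z => if PySem.Int.mod K (4*z+1) == 0 then false else h) h

-- two small arithmetic facts cited by the termination proofs of `gameA` (and `win` below)
theorem pv_if_sub_le (c : Prop) [Decidable c] (K : Int) : (if c then K - 2 else K - 4) ≤ K - 2 := by
  split_ifs <;> omega

theorem pv_game_dec {K k1 k2 : Int} (h2 : ¬ K < 2) (hk1 : k1 ≤ K - 2) (hk2 : k2 ≤ k1 - 2) :
    k2.toNat < K.toNat := by omega

-- A's inner while loop: returns the final (Person_1, Person_2) flags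
def gameA (K : Int) : Bool × Bool :=
  if _h : 2 ≤ K then
    let K1 := if highA K = false then K - 2 else K - 4
    if _h1 : 2 ≤ K1 then
      gameA (if high2A K1 = false then K1 - 2 else K1 - 4)
    else (true, false)
  else (false, true)
termination_by K.toNat
decreasing_by
  exact pv_game_dec (by omega) (pv_if_sub_le _ K) (pv_if_sub_le _ K1)

def paper_strip_game (Kettenl_nge : Int) : Int × Int :=
  (PySem.List.pyRange 1 (Kettenl_nge + 1) 1).foldl
    (fun (c : Int × Int) y =>
      let g := gameA y
      let p2c := if g.1 = false then c.2 + 1 else c.2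
      let p1c := if g.2 = false then c.1 + 1 else c.1
      (p1c, p2c)) (0, 0)

-- ===== PORT B =====
-- any(k % d == 0 and d % 4 in (2, 3) for d in range(2, k + 1))
def sub2B (k : Int) : Bool :=
  (PySem.List.pyRange 2 (k+1) 1).any
    (fun d => PySem.Int.mod k d == 0 && (PySem.Int.mod d 4 == 2 || PySem.Int.mod d 4 == 3))

-- the memo-building loop; the index k1-2 is always in range, `.getD false` only totalizes
def buildMemo (n : Int) : List Bool :=
  (PySem.List.pyRange 2 (n+1) 1).foldl
    (fun memo k =>
      let k1 := if sub2B k then k - 2 else k - 4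
      memo ++ [if k1 < 2 then true else (PySem.List.pyGet? memo (k1-2)).getD false])
    [false, false]

def paper_strip_game_alt (Kettenl_nge : Int) : Int × Int :=
  let memo := buildMemo Kettenl_nge
  (PySem.List.pyRange 1 (Kettenl_nge + 1) 1).foldl
    (fun (c : Int × Int) k =>
      if (PySem.List.pyGet? memo k).getD false then (c.1 + 1, c.2) else (c.1, c.2 + 1))
    (0, 0)

-- ===== PRECONDITION & SPEC =====
def Spec_paper_strip_game (Kettenl_nge : Int) (out : Int × Int) : Prop := out = paper_strip_game_alt Kettenl_nge
instance (Kettenl_nge : Int) (out : Int × Int) : Decidable (Spec_paper_strip_game Kettenl_nge out) := by unfold Spec_paper_strip_game; infer_instance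

-- ===== CLAIM (what is proved, stated in full; the proofs are below) =====
def Claim_equal_paper_strip_game : Prop := ∀ (Kettenl_nge : Int), Dom_paper_strip_game Kettenl_nge → Spec_paper_strip_game Kettenl_nge (paper_strip_game Kettenl_nge)

-- ===== LEMMAS AND PROOFS =====

-- the abstract game value: true iff person 1 wins a strip of length k
def win (k : Int) : Bool :=
  if _h : k < 2 then false
  else
    let k1 := if sub2B k then k - 2 else k - 4
    if _h1 : k1 < 2 then true else win (k1 - 2)
termination_by k.toNat
decreasing_by
  exact pv_game_dec _h (pv_if_sub_le _ k) (le_refl _)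

-- a kill-switch fold: once any element fires, the flag is false forever
theorem foldl_flag (p : Int → Bool) (l : List Int) (b : Bool) :
    l.foldl (fun h x => if p x then false else h) b = (b && !(l.any p)) := by
  induction l generalizing b with
  | nil => simp
  | cons a t ih =>
    simp only [List.foldl_cons, List.any_cons]
    by_cases h : p a
    · rw [if_pos h, ih, h]; simp
    · rw [if_neg h, ih, Bool.not_eq_true] at *; rw [h]; simp

theorem sub2B_iff (k : Int) :
    sub2B k = true ↔ ∃ d, 2 ≤ d ∧ d < k + 1 ∧ k % d = 0 ∧ (d % 4 = 2 ∨ d % 4 = 3) := by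
  constructor
  · intro h
    rw [sub2B, List.any_eq_true] at h
    obtain ⟨d, hd, hp⟩ := h
    rw [PySem.List.mem_pyRange_one] at hd
    rw [PySem.Int.mod_eq_emod_of_pos (a := k) (by omega), PySem.Int.mod_eq_emod_of_pos (a := d) (by omega)] at hp
    simp only [Bool.and_eq_true, Bool.or_eq_true, beq_iff_eq] at hp
    exact ⟨d, hd.1, hd.2, hp.1, hp.2⟩
  · rintro ⟨d, h1, h2, h3, h4⟩
    rw [sub2B, List.any_eq_true]
    refine ⟨d, by rw [PySem.List.mem_pyRange_one]; omega, ?_⟩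
    rw [PySem.Int.mod_eq_emod_of_pos (a := k) (by omega), PySem.Int.mod_eq_emod_of_pos (a := d) (by omega)]
    simp only [Bool.and_eq_true, Bool.or_eq_true, beq_iff_eq]
    exact ⟨h3, h4⟩

theorem highA_eq (K : Int) (hK : 2 ≤ K) : highA K = !(sub2B K) := by
  simp only [highA, foldl_flag, Bool.true_and]
  cases hs : sub2B K with
  | true =>
    rw [sub2B_iff] at hs
    obtain ⟨d, hd2, hdK, hdvd, hmod4⟩ := hs
    simp only [Bool.not_true]
    rcases hmod4 with h4 | h4
    · have hx : ((PySem.List.pyRange 0 (K+1) 1).any fun x => PySem.Int.mod K (4*x+2) == 0) = true := by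
        rw [List.any_eq_true]
        refine ⟨(d-2)/4, by rw [PySem.List.mem_pyRange_one]; omega, ?_⟩
        have hde : 4 * ((d-2)/4) + 2 = d := by omega
        rw [hde, PySem.Int.mod_eq_emod_of_pos (a := K) (by omega)]
        simpa using hdvd
      simp [hx]
    · have hz : ((PySem.List.pyRange 0 (K+1) 1).any fun z => PySem.Int.mod K (4*z+3) == 0) = true := by
        rw [List.any_eq_true]
        refine ⟨(d-3)/4, by rw [PySem.List.mem_pyRange_one]; omega, ?_⟩
        have hde : 4 * ((d-3)/4) + 3 = d := by omega
        rw [hde, PySem.Int.mod_eq_emod_of_pos (a := K) (by omega)]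
        simpa using hdvd
      simp [hz]
  | false =>
    simp only [Bool.not_false]
    rw [Bool.and_eq_true]
    have key : ∀ m : Int, 0 < m → (m % 4 = 2 ∨ m % 4 = 3) → K % m ≠ 0 := by
      intro m hm h4 hdvd
      by_cases hle : m ≤ K
      · have : sub2B K = true := (sub2B_iff K).mpr ⟨m, by omega, by omega, hdvd, h4⟩
        rw [hs] at this; exact absurd this (by simp)
      · rw [Int.emod_eq_of_lt (by omega) (by omega)] at hdvd; omega
    constructor <;>
    · rw [Bool.not_eq_true', List.any_eq_false]
      intro x hx
      rw [PySem.List.mem_pyRange_one] at hx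
      rw [PySem.Int.mod_eq_emod_of_pos (a := K) (by omega)]
      simp only [beq_iff_eq]
      first
        | exact key (4*x+2) (by omega) (Or.inl (by omega))
        | exact key (4*x+3) (by omega) (Or.inr (by omega))

theorem high2A_false (K : Int) (hK : 0 ≤ K) : high2A K = false := by
  rw [high2A]
  rw [PySem.List.pyRange_one_cons (by omega : (0:Int) < K + 1)]
  simp only [List.foldl_cons, foldl_flag]
  simp

theorem gameA_eq_win (K : Int) : gameA K = (win K, !win K) := by
  induction hn : K.toNat using Nat.strong_induction_on generalizing K with
  | _ n ih =>
    rw [gameA, win]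
    by_cases h2 : 2 ≤ K
    · rw [dif_pos h2, dif_neg (by omega : ¬ K < 2)]
      rw [highA_eq K h2]
      have harr : (if (!sub2B K) = false then K - 2 else K - 4)
          = (if sub2B K then K - 2 else K - 4) := by
        cases sub2B K <;> simp
      rw [harr]
      set k1 := if sub2B K then K - 2 else K - 4 with hk1
      by_cases hb : 2 ≤ k1
      · rw [dif_pos hb, dif_neg (by omega : ¬ k1 < 2)]
        rw [high2A_false k1 (by omega), if_pos rfl]
        have hlt : (k1 - 2).toNat < n := by
          have : k1 ≤ K - 2 := by rw [hk1]; split_ifs <;> omega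
          omega
        exact ih (k1 - 2).toNat hlt (k1 - 2) rfl
      · rw [dif_neg hb, dif_pos (by omega : k1 < 2)]; simp
    · rw [dif_neg h2, dif_pos (by omega : K < 2)]; simp

theorem win_lt_two (k : Int) (h : k < 2) : win k = false := by
  rw [win, dif_pos h]

theorem win_two : win 2 = true := by
  rw [win, dif_neg (by omega : ¬ (2:Int) < 2)]
  rw [show sub2B 2 = true by decide]
  simp

-- the memo list built for n : Nat, n ≥ 2, tabulates `win` on 0..n
theorem buildMemo_nat : ∀ n : Nat, 2 ≤ n →
    buildMemo (n : Int) = (List.range (n+1)).map (fun i : Nat => win ((i : Nat) : Int)) := by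
  intro n hn
  induction n with
  | zero => omega
  | succ m ih =>
    by_cases hm : 2 ≤ m
    · have hrec := ih hm
      rw [buildMemo] at hrec ⊢
      have hcast : ((m+1 : Nat) : Int) + 1 = ((m : Int) + 1) + 1 := by push_cast; ring
      rw [hcast, PySem.List.pyRange_one_succ_right (by omega : (2:Int) ≤ (m:Int) + 1),
        List.foldl_append]
      rw [show ((m+1 : Nat) : Int) = (m : Int) + 1 by push_cast; ring] at *
      rw [hrec]
      simp only [List.foldl_cons, List.foldl_nil]
      set k := (m : Int) + 1 with hk
      set k1 := if sub2B k then k - 2 else k - 4 with hk1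
      have hwin : win k = if k1 < 2 then true else win (k1 - 2) := by
        rw [win, dif_neg (by omega : ¬ k < 2)]
        by_cases h : k1 < 2
        · rw [← hk1, dif_pos h, if_pos h]
        · rw [← hk1, dif_neg h, if_neg h]
      have hnew : (if k1 < 2 then true
          else (PySem.List.pyGet? ((List.range (m+1)).map (fun i : Nat => win ((i : Nat) : Int))) (k1-2)).getD false)
          = win k := by
        rw [hwin]
        by_cases h : k1 < 2
        · simp [h]
        · rw [if_neg h, if_neg h]
          have hnn : 0 ≤ k1 - 2 := by omega
          have hlt : k1 - 2 ≤ (m : Int) - 3 := by rw [hk1]; split_ifs <;> omega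
          rw [show k1 - 2 = (((k1-2).toNat : Nat) : Int) by omega]
          rw [PySem.List.pyGet?_natCast]
          have hidx : (k1-2).toNat < m + 1 := by omega
          simp only [List.getElem?_map, List.getElem?_range, hidx,
            Option.map_some, Option.getD_some]
      rw [hnew]
      rw [show List.range (m+1+1) = List.range (m+1) ++ [m+1] from List.range_succ]
      rw [List.map_append]
      simp only [List.map_cons, List.map_nil]
      rw [show ((m+1 : Nat) : Int) = k by rw [hk]; push_cast; ring]
    · have hm2 : m + 1 = 2 := by omega
      rw [hm2]
      rw [buildMemo]
      rw [show PySem.List.pyRange 2 (((2:Nat):Int)+1) 1 = [2] by decide]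
      simp only [List.foldl_cons, List.foldl_nil]
      rw [show sub2B 2 = true by decide]
      norm_num
      simp only [List.range_succ, List.range_zero, List.nil_append,
        List.map_cons, List.map_nil, List.cons_append]
      norm_num
      exact ⟨win_lt_two 0 (by norm_num), win_lt_two 1 (by norm_num), win_two⟩

theorem memo_spec (N y : Int) (h1 : 1 ≤ y) (h2 : y ≤ N) :
    (PySem.List.pyGet? (buildMemo N) y).getD false = win y := by
  by_cases hN : 2 ≤ N
  · rw [show N = ((N.toNat : Nat) : Int) by omega]
    rw [buildMemo_nat N.toNat (by omega)]
    rw [show y = ((y.toNat : Nat) : Int) by omega, PySem.List.pyGet?_natCast]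
    rw [List.getElem?_map, List.getElem?_range (by omega : y.toNat < N.toNat + 1)]
    simp
  · have hy : y = 1 := by omega
    have hN1 : N = 1 := by omega
    subst hy hN1
    rw [show buildMemo 1 = [false, false] by rfl]
    rw [show (PySem.List.pyGet? [false, false] 1) = some false by rfl]
    rw [win_lt_two 1 (by omega)]
    rfl

theorem paper_strip_game_spec : Claim_equal_paper_strip_game := by
  intro N _
  show paper_strip_game N = paper_strip_game_alt N
  rw [paper_strip_game, paper_strip_game_alt]
  apply PySem.List.foldl_congr_mem
  intro c y hy
  rw [PySem.List.mem_pyRange_one] at hy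
  rw [gameA_eq_win, memo_spec N y hy.1 (by omega)]
  cases win y <;> simp
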